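-- pv_equiv track=rewrite | github.com/seanchatmangpt/ggen-spec-kit | scripts/ast_violation_fixer.py | fix_collapsible_if_regex
-- ===== SOURCE A (Python) =====
-- from typing import Dict, List, Set, Tuple
--
-- def fix_collapsible_if_regex(content: str) -> Tuple[str, int]:
--     """Fix SIM102: collapsible-if statements."""
--     changes = 0
--     lines = content.split('\n')
--
--     i = 0
--     while i < len(lines) - 1:
--         line = lines[i].rstrip()
--         next_line = lines[i + 1].rstrip() if i + 1 < len(lines) else ''
--
--         # Match: if cond1:
--         #           if cond2:
--         if line.strip().startswith('if ') and line.strip().endswith(':'):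
--             indent1 = len(line) - len(line.lstrip())
--             if next_line.strip().startswith('if ') and next_line.strip().endswith(':'):
--                 indent2 = len(next_line) - len(next_line.lstrip())
--
--                 if indent2 == indent1 + 4:  # Standard 4-space indent
--                     # Collapse: if cond1 and cond2:
--                     cond1 = line.strip()[3:-1]  # Remove 'if ' and ':'
--                     cond2 = next_line.strip()[3:-1]
--
--                     lines[i] = ' ' * indent1 + f'if {cond1} and {cond2}:'
--                     lines.pop(i + 1)
--                     changes += 1
--                     continue
--
--         i += 1
--
--     return '\n'.join(lines), changes
-- ===== SOURCE B (Python) =====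
-- def fix_collapsible_if_regex(content):
--     """Fix SIM102: collapsible-if statements (single pass, O(n))."""
--     changes = 0
--     out = []
--     for raw in content.split('\n'):
--         if out:
--             prev = out[-1].rstrip()
--             cur = raw.rstrip()
--             ps = prev.strip()
--             cs = cur.strip()
--             if (ps.startswith('if ') and ps.endswith(':')
--                     and cs.startswith('if ') and cs.endswith(':')):
--                 i1 = len(prev) - len(prev.lstrip())
--                 i2 = len(cur) - len(cur.lstrip())
--                 if i2 == i1 + 4:
--                     out[-1] = ' ' * i1 + f'if {ps[3:-1]} and {cs[3:-1]}:'
--                     changes += 1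
--                     continue
--         out.append(raw)
--     return '\n'.join(out), changes
-- ===== Notes on version B (the rewrite author's own statement) =====
-- stated objective: faster
-- what changed: Replaces the while-loop that repeatedly rewrites and pops from the line list in place (each pop shifts the tail) with a single forward pass that appends to an output list and merges each incoming line into the last emitted line, so chained collapses need no re-indexing.
import Mathlib
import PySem

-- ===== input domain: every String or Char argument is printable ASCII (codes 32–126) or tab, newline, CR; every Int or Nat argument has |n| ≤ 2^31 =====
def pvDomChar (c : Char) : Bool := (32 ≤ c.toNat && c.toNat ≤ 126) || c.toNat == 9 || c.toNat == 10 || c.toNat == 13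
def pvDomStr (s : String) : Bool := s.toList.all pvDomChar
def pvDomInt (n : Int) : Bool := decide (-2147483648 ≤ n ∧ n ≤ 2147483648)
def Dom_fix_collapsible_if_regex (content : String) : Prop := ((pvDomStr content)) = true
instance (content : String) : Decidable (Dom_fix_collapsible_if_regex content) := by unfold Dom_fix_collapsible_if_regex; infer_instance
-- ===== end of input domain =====

-- B replaces A's in-place while-loop (rewrite lines[i], pop lines[i+1], re-check) with a single
-- forward pass that appends to an output list and merges each line into the last emitted one: O(n) vs A's O(n^2).

-- ===== PORT A =====
-- A's while-loop: state (lines, i, changes); merge rewrites lines[i], pops lines[i+1] and re-checks i.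
def pvLoopA (lines : List String) (i : Nat) (changes : Int) : List String × Int :=
  if _h : i + 1 < lines.length then
    let line := PySem.Str.rstrip (lines.getD i "")
    let next_line := PySem.Str.rstrip (lines.getD (i + 1) "")
    if PySem.Str.startswith (PySem.Str.strip line) "if " && PySem.Str.endswith (PySem.Str.strip line) ":" then
      let indent1 : Int := PySem.Str.len line - PySem.Str.len (PySem.Str.lstrip line)
      if PySem.Str.startswith (PySem.Str.strip next_line) "if " && PySem.Str.endswith (PySem.Str.strip next_line) ":" then
        let indent2 : Int := PySem.Str.len next_line - PySem.Str.len (PySem.Str.lstrip next_line)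
        if indent2 == indent1 + 4 then
          let cond1 := PySem.Str.slice (PySem.Str.strip line) (some 3) (some (-1))
          let cond2 := PySem.Str.slice (PySem.Str.strip next_line) (some 3) (some (-1))
          let newline := PySem.Str.join "" [String.ofList (List.replicate indent1.toNat ' '), "if ", cond1, " and ", cond2, ":"]
          pvLoopA ((lines.set i newline).eraseIdx (i + 1)) i (changes + 1)
        else pvLoopA lines (i + 1) changes
      else pvLoopA lines (i + 1) changes
    else pvLoopA lines (i + 1) changes
  else (lines, changes)
termination_by lines.length - i
decreasing_by
  · simp only [List.length_eraseIdx, List.length_set]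
    split <;> omega
  · omega
  · omega
  · omega

def fix_collapsible_if_regex (content : String) : String × Int :=
  let lines := (PySem.Str.split? content "\n").getD []
  let r := pvLoopA lines 0 0
  (PySem.Str.join "\n" r.1, r.2)

-- ===== PORT B =====
-- B's loop body: merge the incoming raw line into the last emitted line when collapsible, else append it.
def pvStepB (acc : List String × Int) (raw : String) : List String × Int :=
  let out := acc.1
  let changes := acc.2
  if out.isEmpty then (out ++ [raw], changes)
  else
    let prev := PySem.Str.rstrip (out.getD (out.length - 1) "")
    let cur := PySem.Str.rstrip raw
    let ps := PySem.Str.strip prev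
    let cs := PySem.Str.strip cur
    if (PySem.Str.startswith ps "if " && PySem.Str.endswith ps ":") &&
       (PySem.Str.startswith cs "if " && PySem.Str.endswith cs ":") then
      let i1 : Int := PySem.Str.len prev - PySem.Str.len (PySem.Str.lstrip prev)
      let i2 : Int := PySem.Str.len cur - PySem.Str.len (PySem.Str.lstrip cur)
      if i2 == i1 + 4 then
        (out.set (out.length - 1)
          (PySem.Str.join "" [String.ofList (List.replicate i1.toNat ' '), "if ",
            PySem.Str.slice ps (some 3) (some (-1)), " and ",
            PySem.Str.slice cs (some 3) (some (-1)), ":"]), changes + 1)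
      else (out ++ [raw], changes)
    else (out ++ [raw], changes)

def fix_collapsible_if_regex_alt (content : String) : String × Int :=
  let r := ((PySem.Str.split? content "\n").getD []).foldl pvStepB ([], 0)
  (PySem.Str.join "\n" r.1, r.2)

-- ===== PRECONDITION & SPEC =====
def Spec_fix_collapsible_if_regex (content : String) (out : String × Int) : Prop := out = fix_collapsible_if_regex_alt content
instance (content : String) (out : String × Int) : Decidable (Spec_fix_collapsible_if_regex content out) := by unfold Spec_fix_collapsible_if_regex; infer_instance

-- ===== CLAIM (what is proved, stated in full; the proofs are below) =====
def Claim_equal_fix_collapsible_if_regex : Prop := ∀ (content : String), Dom_fix_collapsible_if_regex content → Spec_fix_collapsible_if_regex content (fix_collapsible_if_regex content)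

-- ===== LEMMAS AND PROOFS =====

lemma pv_getD_append_left (xs ys : List String) (i : Nat) (h : i < xs.length) :
    (xs ++ ys).getD i "" = xs.getD i "" := by
  simp [List.getD_eq_getElem?_getD, List.getElem?_append_left h]

lemma pv_getD_append_mid (xs ys : List String) (y : String) :
    (xs ++ y :: ys).getD xs.length "" = y := by
  simp [List.getD_eq_getElem?_getD]

lemma pv_eraseIdx_append_mid (xs ys : List String) (y : String) :
    (xs ++ y :: ys).eraseIdx xs.length = xs ++ ys := by
  induction xs with
  | nil => simp
  | cons a t ih => simp [ih]

lemma pv_eraseIdx_append_len (xs ys : List String) (y : String) (i : Nat) (h : i = xs.length) :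
    (xs ++ y :: ys).eraseIdx i = xs ++ ys := by
  subst h; exact pv_eraseIdx_append_mid xs ys y

lemma pv_rewrite_merge (out : List String) (y : String) (ys : List String) (nl : String) (hn : 1 ≤ out.length) :
    ((out ++ y :: ys).set (out.length - 1) nl).eraseIdx out.length = out.set (out.length - 1) nl ++ ys := by
  rw [List.set_append_left _ nl (by omega),
    pv_eraseIdx_append_len (out.set (out.length - 1) nl) ys y out.length (by simp)]

-- A's loop, started with the already-finalized prefix `out` and the unprocessed suffix `rest`,
-- is exactly B's fold of `rest` over the accumulator `(out, c)`.
lemma pvLoopA_eq_foldl (rest : List String) :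
    ∀ (out : List String) (c : Int), out ≠ [] →
      pvLoopA (out ++ rest) (out.length - 1) c = rest.foldl pvStepB (out, c) := by
  induction rest with
  | nil =>
    intro out c h
    have hn : 1 ≤ out.length := List.length_pos_iff.mpr h
    rw [pvLoopA, dif_neg (by simp only [List.append_nil]; omega)]
    simp
  | cons l rest' ih =>
    intro out c h
    have hn : 1 ≤ out.length := List.length_pos_iff.mpr h
    have hidx : out.length - 1 + 1 = out.length := by omega
    have hne : out.isEmpty = false := by simpa [List.isEmpty_iff] using h
    rw [pvLoopA, dif_pos (by simp only [hidx, List.length_append, List.length_cons]; omega)]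
    simp only [hidx, pv_getD_append_left out (l :: rest') (out.length - 1) (by omega),
      pv_getD_append_mid, List.foldl_cons, pvStepB, hne, Bool.false_eq_true, if_false]
    set prev := PySem.Str.rstrip (out.getD (out.length - 1) "") with hprev
    set cur := PySem.Str.rstrip l with hcur
    have happ : pvLoopA (out ++ l :: rest') out.length c = List.foldl pvStepB (out ++ [l], c) rest' := by
      rw [show out ++ l :: rest' = (out ++ [l]) ++ rest' by simp,
        show out.length = (out ++ [l]).length - 1 by simp]
      exact ih (out ++ [l]) c (by simp)
    by_cases h1 : (PySem.Str.startswith (PySem.Str.strip prev) "if " && PySem.Str.endswith (PySem.Str.strip prev) ":") = true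
    · rw [if_pos h1]
      by_cases h2 : (PySem.Str.startswith (PySem.Str.strip cur) "if " && PySem.Str.endswith (PySem.Str.strip cur) ":") = true
      · rw [if_pos h2, if_pos (show ((PySem.Str.startswith (PySem.Str.strip prev) "if " && PySem.Str.endswith (PySem.Str.strip prev) ":") && (PySem.Str.startswith (PySem.Str.strip cur) "if " && PySem.Str.endswith (PySem.Str.strip cur) ":")) = true by rw [h1, h2]; rfl)]
        by_cases h3 : ((PySem.Str.len cur - PySem.Str.len (PySem.Str.lstrip cur)) == (PySem.Str.len prev - PySem.Str.len (PySem.Str.lstrip prev)) + 4) = true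
        · rw [if_pos h3, if_pos h3, pv_rewrite_merge out l rest' _ hn]
          have key : forall nl : String,
              pvLoopA (out.set (out.length - 1) nl ++ rest') (out.length - 1) (c + 1) =
                List.foldl pvStepB (out.set (out.length - 1) nl, c + 1) rest' := by
            intro nl
            have h4 := ih (out.set (out.length - 1) nl) (c + 1)
              (List.ne_nil_of_length_pos (by rw [List.length_set]; omega))
            rwa [List.length_set] at h4
          exact key _
        · rw [if_neg h3, if_neg h3]
          exact happ
      · have h2' : (PySem.Str.startswith (PySem.Str.strip cur) "if " && PySem.Str.endswith (PySem.Str.strip cur) ":") = false := Bool.eq_false_iff.mpr h2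
        rw [if_neg h2, if_neg (show ¬(((PySem.Str.startswith (PySem.Str.strip prev) "if " && PySem.Str.endswith (PySem.Str.strip prev) ":") && (PySem.Str.startswith (PySem.Str.strip cur) "if " && PySem.Str.endswith (PySem.Str.strip cur) ":")) = true) by rw [h2']; simp)]
        exact happ
    · have h1' : (PySem.Str.startswith (PySem.Str.strip prev) "if " && PySem.Str.endswith (PySem.Str.strip prev) ":") = false := Bool.eq_false_iff.mpr h1
      rw [if_neg h1, if_neg (show ¬(((PySem.Str.startswith (PySem.Str.strip prev) "if " && PySem.Str.endswith (PySem.Str.strip prev) ":") && (PySem.Str.startswith (PySem.Str.strip cur) "if " && PySem.Str.endswith (PySem.Str.strip cur) ":")) = true) by rw [h1']; simp)]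
      exact happ

-- ===== VERDICT (by name: the statement is the Claim_ definition above) =====
theorem fix_collapsible_if_regex_spec : Claim_equal_fix_collapsible_if_regex := by
  intro content _
  unfold Spec_fix_collapsible_if_regex
  simp only [fix_collapsible_if_regex, fix_collapsible_if_regex_alt]
  cases hl : (PySem.Str.split? content "\n").getD [] with
  | nil =>
    have hA : pvLoopA [] 0 0 = ([], 0) := by rw [pvLoopA]; simp
    simp [hA]
  | cons x xs =>
    have hstep : pvStepB ([], 0) x = ([x], 0) := by simp [pvStepB]
    have h0 : pvLoopA (x :: xs) 0 0 = List.foldl pvStepB ([x], 0) xs := by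
      have h4 := pvLoopA_eq_foldl xs [x] 0 (by simp)
      simpa using h4
    simp [h0, hstep]
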